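-- pv_equiv track=rewrite | github.com/evarg-sys/Project-Trishul | parsing_model.py | _infer_cluster_type
-- ===== SOURCE A (Python) =====
-- def _infer_cluster_type(common_words):
--     """Infer disaster type from common words"""
--     word_list = [w[0] for w in common_words]
--
--     flood_words = {'flood', 'water', 'river', 'rain'}
--     fire_words = {'fire', 'burn', 'smoke', 'flame'}
--     quake_words = {'earthquake', 'quake', 'tremor', 'seismic'}
--
--     if any(w in flood_words for w in word_list):
--         return 'flood'
--     elif any(w in fire_words for w in word_list):
--         return 'fire'
--     elif any(w in quake_words for w in word_list):
--         return 'earthquake'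
--     else:
--         return 'unknown'
-- ===== SOURCE B (Python) =====
-- _RANK = {'flood': 0, 'water': 0, 'river': 0, 'rain': 0,
--          'fire': 1, 'burn': 1, 'smoke': 1, 'flame': 1,
--          'earthquake': 2, 'quake': 2, 'tremor': 2, 'seismic': 2}
--
-- _NAME = {0: 'flood', 1: 'fire', 2: 'earthquake'}
--
--
-- def _infer_cluster_type(common_words):
--     """Infer disaster type as the minimum priority rank over the words."""
--     best = 3
--     for w in common_words:
--         best = min(best, _RANK.get(w[0], 3))
--     return _NAME.get(best, 'unknown')
-- ===== Notes on version B (the rewrite author's own statement) =====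
-- stated objective: alternative
-- what changed: Replaces A's three sequential any-scans over per-category keyword sets by a numeric reduction: each word maps to a priority rank (flood=0, fire=1, earthquake=2, other=3), a single min-fold computes the best rank, and the rank is converted back to a category name.
import Mathlib
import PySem

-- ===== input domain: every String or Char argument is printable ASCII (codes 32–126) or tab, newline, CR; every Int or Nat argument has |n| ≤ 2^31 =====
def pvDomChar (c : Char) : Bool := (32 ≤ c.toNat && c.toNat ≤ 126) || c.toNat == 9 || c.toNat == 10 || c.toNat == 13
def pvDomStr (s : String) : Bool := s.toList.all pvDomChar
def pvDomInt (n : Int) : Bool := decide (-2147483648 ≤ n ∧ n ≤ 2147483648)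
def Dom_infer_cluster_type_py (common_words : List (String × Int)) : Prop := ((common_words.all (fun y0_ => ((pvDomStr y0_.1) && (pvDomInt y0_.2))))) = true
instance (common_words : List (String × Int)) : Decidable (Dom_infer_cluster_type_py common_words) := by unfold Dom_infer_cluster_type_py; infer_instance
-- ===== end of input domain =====

-- B replaces A's three sequential any-scans over per-category keyword sets by a numeric
-- reduction: each word maps to a priority rank (flood=0, fire=1, earthquake=2, other=3),
-- one min-fold finds the best rank, and the rank is converted back to a name.

-- ===== PORT A =====
def infer_cluster_type_py (common_words : List (String × Int)) : String :=
  let word_list := common_words.map (fun w => w.1)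
  let flood_words : PySem.Set String := PySem.Set.ofList ["flood", "water", "river", "rain"]
  let fire_words : PySem.Set String := PySem.Set.ofList ["fire", "burn", "smoke", "flame"]
  let quake_words : PySem.Set String := PySem.Set.ofList ["earthquake", "quake", "tremor", "seismic"]
  if word_list.any (fun w => PySem.Set.contains flood_words w) then "flood"
  else if word_list.any (fun w => PySem.Set.contains fire_words w) then "fire"
  else if word_list.any (fun w => PySem.Set.contains quake_words w) then "earthquake"
  else "unknown"

-- ===== PORT B =====
-- the module-level word → rank dict of Source B
def pvRank : PySem.Dict String Int :=
  PySem.Dict.ofList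
    [("flood", 0), ("water", 0), ("river", 0), ("rain", 0),
     ("fire", 1), ("burn", 1), ("smoke", 1), ("flame", 1),
     ("earthquake", 2), ("quake", 2), ("tremor", 2), ("seismic", 2)]

-- the module-level rank → name dict of Source B
def pvName : PySem.Dict Int String :=
  PySem.Dict.ofList [(0, "flood"), (1, "fire"), (2, "earthquake")]

def infer_cluster_type_py_alt (common_words : List (String × Int)) : String :=
  let best : Int :=
    common_words.foldl (fun b w => min b (pvRank.getD w.1 3)) 3
  pvName.getD best "unknown"

-- ===== PRECONDITION & SPEC =====
def Spec_infer_cluster_type_py (common_words : List (String × Int)) (out : String) : Prop := out = infer_cluster_type_py_alt common_words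
instance (common_words : List (String × Int)) (out : String) : Decidable (Spec_infer_cluster_type_py common_words out) := by unfold Spec_infer_cluster_type_py; infer_instance

-- ===== CLAIM (what is proved, stated in full; the proofs are below) =====
def Claim_equal_infer_cluster_type_py : Prop := ∀ (common_words : List (String × Int)), Dom_infer_cluster_type_py common_words → Spec_infer_cluster_type_py common_words (infer_cluster_type_py common_words)

-- ===== LEMMAS AND PROOFS =====

-- the literal dict, unfolded to its item list
lemma pvRank_mk : pvRank = PySem.Dict.mk
    [("flood", 0), ("water", 0), ("river", 0), ("rain", 0),
     ("fire", 1), ("burn", 1), ("smoke", 1), ("flame", 1),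
     ("earthquake", 2), ("quake", 2), ("tremor", 2), ("seismic", 2)] := by decide

-- B's rank lookup, characterised through A's three word sets
lemma rank_eq (w : String) :
    pvRank.getD w 3 =
      (if PySem.Set.contains (PySem.Set.ofList ["flood", "water", "river", "rain"]) w then 0
       else if PySem.Set.contains (PySem.Set.ofList ["fire", "burn", "smoke", "flame"]) w then 1
       else if PySem.Set.contains (PySem.Set.ofList ["earthquake", "quake", "tremor", "seismic"]) w then 2
       else 3) := by
  by_cases e1 : w = "flood"; · subst e1; decide
  by_cases e2 : w = "water"; · subst e2; decide
  by_cases e3 : w = "river"; · subst e3; decide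
  by_cases e4 : w = "rain"; · subst e4; decide
  by_cases e5 : w = "fire"; · subst e5; decide
  by_cases e6 : w = "burn"; · subst e6; decide
  by_cases e7 : w = "smoke"; · subst e7; decide
  by_cases e8 : w = "flame"; · subst e8; decide
  by_cases e9 : w = "earthquake"; · subst e9; decide
  by_cases e10 : w = "quake"; · subst e10; decide
  by_cases e11 : w = "tremor"; · subst e11; decide
  by_cases e12 : w = "seismic"; · subst e12; decide
  have hs1 : PySem.Set.ofList ["flood", "water", "river", "rain"]
      = ["flood", "water", "river", "rain"] := by decide
  have hs2 : PySem.Set.ofList ["fire", "burn", "smoke", "flame"]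
      = ["fire", "burn", "smoke", "flame"] := by decide
  have hs3 : PySem.Set.ofList ["earthquake", "quake", "tremor", "seismic"]
      = ["earthquake", "quake", "tremor", "seismic"] := by decide
  rw [pvRank_mk, hs1, hs2, hs3]
  simp only [PySem.Dict.getD, PySem.Dict.get?_mk_cons, PySem.Set.contains,
    List.contains_cons, List.contains_nil]
  simp [Ne.symm e1, Ne.symm e2, Ne.symm e3, Ne.symm e4, Ne.symm e5, Ne.symm e6, Ne.symm e7,
        Ne.symm e8, Ne.symm e9, Ne.symm e10, Ne.symm e11, Ne.symm e12, PySem.Dict.get?,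
        e1, e2, e3, e4, e5, e6, e7, e8, e9, e10, e11, e12]

-- the min-fold is ≤ k iff the start or some rank is ≤ k
lemma fold_le_iff (xs : List (String × Int)) (a k : Int) :
    (xs.foldl (fun b w => min b (pvRank.getD w.1 3)) a ≤ k)
      ↔ a ≤ k ∨ ∃ w ∈ xs, pvRank.getD w.1 3 ≤ k := by
  induction xs generalizing a with
  | nil => simp
  | cons hd tl ih =>
    simp only [List.foldl_cons, ih, min_le_iff, List.mem_cons]
    constructor
    · rintro (( h | h) | ⟨w, hw, h⟩)
      · exact Or.inl h
      · exact Or.inr ⟨hd, Or.inl rfl, h⟩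
      · exact Or.inr ⟨w, Or.inr hw, h⟩
    · rintro (h | ⟨w, (rfl | hw), h⟩)
      · exact Or.inl (Or.inl h)
      · exact Or.inl (Or.inr h)
      · exact Or.inr ⟨w, hw, h⟩

-- a lower bound on the start and on every rank is a lower bound on the min-fold
lemma le_fold (xs : List (String × Int)) (a p : Int) (ha : p ≤ a)
    (h : ∀ w ∈ xs, p ≤ pvRank.getD w.1 3) :
    p ≤ xs.foldl (fun b w => min b (pvRank.getD w.1 3)) a := by
  induction xs generalizing a with
  | nil => exact ha
  | cons hd tl ih =>
    exact ih _ (le_min ha (h hd (List.mem_cons_self))) (fun w hw => h w (List.mem_cons_of_mem _ hw))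


-- ranks are nonnegative
lemma rank_nonneg (w : String) : (0:Int) ≤ pvRank.getD w 3 := by
  rw [rank_eq]; split_ifs <;> norm_num

-- the min-fold of B equals A's if-chain over the three any-scans
lemma best_eq (cw : List (String × Int)) :
    cw.foldl (fun b w => min b (pvRank.getD w.1 3)) 3 =
      (if cw.any (fun w => PySem.Set.contains (PySem.Set.ofList ["flood", "water", "river", "rain"]) w.1) then 0
       else if cw.any (fun w => PySem.Set.contains (PySem.Set.ofList ["fire", "burn", "smoke", "flame"]) w.1) then 1
       else if cw.any (fun w => PySem.Set.contains (PySem.Set.ofList ["earthquake", "quake", "tremor", "seismic"]) w.1) then 2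
       else 3) := by
  split_ifs with h1 h2 h3
  · obtain ⟨w, hw, hc⟩ := List.any_eq_true.mp h1
    refine le_antisymm ?_ (le_fold _ _ _ (by norm_num) (fun w _ => rank_nonneg w.1))
    refine (fold_le_iff cw 3 0).mpr (Or.inr ⟨w, hw, ?_⟩)
    rw [rank_eq]
    split_ifs with a b c <;> first | exact absurd hc a | norm_num
  · obtain ⟨w, hw, hc⟩ := List.any_eq_true.mp h2
    have hn1 := List.any_eq_false.mp (Bool.of_not_eq_true h1)
    refine le_antisymm ?_ (le_fold _ _ _ (by norm_num) ?_)
    · refine (fold_le_iff cw 3 1).mpr (Or.inr ⟨w, hw, ?_⟩)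
      rw [rank_eq]
      split_ifs with a b c <;> first | exact absurd hc b | norm_num
    · intro v hv
      rw [rank_eq]
      split_ifs with a b c <;> first | exact absurd a (hn1 v hv) | norm_num
  · obtain ⟨w, hw, hc⟩ := List.any_eq_true.mp h3
    have hn1 := List.any_eq_false.mp (Bool.of_not_eq_true h1)
    have hn2 := List.any_eq_false.mp (Bool.of_not_eq_true h2)
    refine le_antisymm ?_ (le_fold _ _ _ (by norm_num) ?_)
    · refine (fold_le_iff cw 3 2).mpr (Or.inr ⟨w, hw, ?_⟩)
      rw [rank_eq]
      split_ifs with a b c <;> first | exact absurd hc c | norm_num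
    · intro v hv
      rw [rank_eq]
      split_ifs with a b c <;>
        first | exact absurd a (hn1 v hv) | exact absurd b (hn2 v hv) | norm_num
  · have hn1 := List.any_eq_false.mp (Bool.of_not_eq_true h1)
    have hn2 := List.any_eq_false.mp (Bool.of_not_eq_true h2)
    have hn3 := List.any_eq_false.mp (Bool.of_not_eq_true h3)
    refine le_antisymm ((fold_le_iff cw 3 3).mpr (Or.inl le_rfl)) (le_fold _ _ _ le_rfl ?_)
    intro v hv
    rw [rank_eq]
    split_ifs with a b c <;>
      first
      | exact absurd a (hn1 v hv)
      | exact absurd b (hn2 v hv)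
      | exact absurd c (hn3 v hv)
      | norm_num

-- ===== VERDICT (by name: the statement is the Claim_ definition above) =====
theorem infer_cluster_type_py_spec : Claim_equal_infer_cluster_type_py := by
  intro cw _
  show infer_cluster_type_py cw = infer_cluster_type_py_alt cw
  unfold infer_cluster_type_py infer_cluster_type_py_alt
  simp only [List.any_map, Function.comp_def, best_eq]
  split_ifs <;> decide
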